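-- pv_equiv track=rewrite | github.com/sdegen95/AI-Seminar-ML | Gal-conjecture/Updated/gal_july24.py | gamma_vector
-- ===== SOURCE A (Python) =====
-- import math
--
-- def gamma_vector(h_vec):
--     gam_vec = []
--     n = len(h_vec)-1
--     d = n//2
--
--     # gamma 0
--     gam_vec.append(h_vec[0])
--
--     # gamma 1 to d
--     for i in range(1,d+1):
--         g_k = h_vec[i]
--         for j in range(i):
--             g_k -= math.comb(n-2*j,i-j)*gam_vec[j]
--         gam_vec.append(g_k)
--
--     return gam_vec
-- ===== SOURCE B (Python) =====
-- import math
--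
-- def gamma_vector(h_vec):
--     n = len(h_vec) - 1
--     d = n // 2
--     size = d + 1
--     # write the system as (I + N) * gamma = h with N strictly lower triangular,
--     # and sum the truncated Neumann series gamma = sum_{k=0}^{d} (-N)^k h
--     N = [[math.comb(n - 2 * j, i - j) for j in range(i)] for i in range(size)]
--     v = h_vec[:size]
--     acc = list(v)
--     sign = -1
--     for _ in range(d):
--         v = [sum(N[i][j] * v[j] for j in range(i)) for i in range(size)]
--         acc = [a + sign * x for a, x in zip(acc, v)]
--         sign = -sign
--     return acc
-- ===== Notes on version B (the rewrite author's own statement) =====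
-- stated objective: alternative
-- what changed: B solves (I+N)*gamma=h by summing the truncated alternating Neumann series gamma = sum_{k=0}^{d} (-N)^k h of the precomputed strictly-lower-triangular coupling matrix N (d matrix-vector products computing all gammas simultaneously), instead of A's forward substitution that computes each gamma_i from the previously computed gammas; B trades this for an extra factor d of arithmetic.
import Mathlib
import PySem

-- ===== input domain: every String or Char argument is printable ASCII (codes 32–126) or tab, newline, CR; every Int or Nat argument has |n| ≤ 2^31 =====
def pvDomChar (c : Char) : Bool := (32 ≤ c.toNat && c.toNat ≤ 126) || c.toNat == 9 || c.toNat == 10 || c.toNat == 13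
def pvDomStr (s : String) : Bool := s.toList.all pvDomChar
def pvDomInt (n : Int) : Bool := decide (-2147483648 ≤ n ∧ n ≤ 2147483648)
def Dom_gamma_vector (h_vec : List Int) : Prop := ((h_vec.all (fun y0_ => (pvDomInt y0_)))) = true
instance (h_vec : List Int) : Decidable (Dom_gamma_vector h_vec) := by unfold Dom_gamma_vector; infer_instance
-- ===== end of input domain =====

-- B sums the truncated alternating Neumann series gamma = sum_{k=0}^{d} (-N)^k h of the strictly-lower-triangular coupling matrix N instead of A's forward substitution; objective: alternative algorithm, more arithmetic but no sequential dependence between gammas; B returns [] where A raises on the empty list.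


-- math.comb(a, b); everywhere either port calls it both arguments are nonnegative, where Nat.choose on toNat is exact
def pyComb (a b : Int) : Int := (Nat.choose a.toNat b.toNat : Int)

-- ===== PORT A =====
def gamma_vector (h_vec : List Int) : List Int :=
  let n : Int := (h_vec.length : Int) - 1
  let d : Int := PySem.Int.floordiv n 2
  (PySem.List.pyRange 1 (d + 1) 1).foldl
    (fun gam_vec i =>
      let gk :=
        (PySem.List.pyRange 0 i 1).foldl
          (fun g j => g - pyComb (n - 2 * j) (i - j) * PySem.List.pyGetD gam_vec j 0)
          (PySem.List.pyGetD h_vec i 0)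
      gam_vec ++ [gk])
    [PySem.List.pyGetD h_vec 0 0]

-- ===== PORT B =====
def gamma_vector_alt (h_vec : List Int) : List Int :=
  let n : Int := (h_vec.length : Int) - 1
  let d : Int := PySem.Int.floordiv n 2
  let size : Int := d + 1
  let N : List (List Int) :=
    (PySem.List.pyRange 0 size 1).map (fun i =>
      (PySem.List.pyRange 0 i 1).map (fun j => pyComb (n - 2 * j) (i - j)))
  let v0 : List Int := PySem.List.slice h_vec none (some size)
  let res :=
    (PySem.List.pyRange 0 d 1).foldl
      (fun (st : List Int × List Int × Int) _ =>
        let acc := st.1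
        let v := st.2.1
        let sign := st.2.2
        let v' := (PySem.List.pyRange 0 size 1).map (fun i =>
          ((PySem.List.pyRange 0 i 1).map (fun j =>
            PySem.List.pyGetD (PySem.List.pyGetD N i []) j 0 * PySem.List.pyGetD v j 0)).sum)
        ((acc.zip v').map (fun p => p.1 + sign * p.2), v', -sign))
      (v0, v0, (-1 : Int))
  res.1

-- ===== PRECONDITION & SPEC =====
-- Pre_ excludes only the empty list, on which A raises IndexError (h_vec[0]).
def Pre_gamma_vector (h_vec : List Int) : Prop := h_vec ≠ []
instance (h_vec : List Int) : Decidable (Pre_gamma_vector h_vec) := by unfold Pre_gamma_vector; infer_instance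
def pvWitness_gamma_vector : List Int := [1, 4, 2]

def Spec_gamma_vector (h_vec : List Int) (out : List Int) : Prop := out = gamma_vector_alt h_vec
instance (h_vec : List Int) (out : List Int) : Decidable (Spec_gamma_vector h_vec out) := by unfold Spec_gamma_vector; infer_instance

-- ===== CLAIM (what is proved, stated in full; the proofs are below) =====
def Claim_equal_gamma_vector : Prop := ∀ (h_vec : List Int), Dom_gamma_vector h_vec → Pre_gamma_vector h_vec → Spec_gamma_vector h_vec (gamma_vector h_vec)
-- ===== LEMMAS AND PROOFS =====

-- the recurrence A solves: gamma_i = h_i - sum_{j<i} C(n-2j, i-j) gamma_j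
def gref (h : List Int) (n : Int) : Nat → Int
  | i =>
    h.getD i 0 -
      (((List.range i).attach).map (fun j =>
        pyComb (n - 2 * (j.1 : Int)) ((i : Int) - (j.1 : Int)) * gref h n j.1)).sum
termination_by i => i
decreasing_by exact List.mem_range.mp j.2

-- the matrix entry N[i][j] (j < i)
def cf (n : Int) (i j : Nat) : Int := pyComb (n - 2 * (j : Int)) ((i : Int) - (j : Int))

lemma gref_eq (h : List Int) (n : Int) (i : Nat) :
    gref h n i = h.getD i 0 -
      ((List.range i).map (fun (j : Nat) => cf n i j * gref h n j)).sum := by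
  rw [gref]
  congr 1
  simp only [List.map_subtype, List.unattach_attach, cf]

lemma getD_map_range {β : Type} (g : Nat → β) (dflt : β) (k j : Nat) (hj : j < k) :
    ((List.range k).map g).getD j dflt = g j := by
  simp [List.getD_eq_getElem?_getD, hj]

lemma foldl_sub {α : Type} (f : α → Int) : ∀ (l : List α) (a : Int),
    l.foldl (fun g j => g - f j) a = a - (l.map f).sum
  | [], a => by simp
  | x :: l, a => by simp [List.foldl_cons, foldl_sub f l, sub_sub]

-- A-side characterisation: the row-oriented fold builds [gref 0, …, gref k]
lemma A_fold (h : List Int) (n : Int) (k : Nat) :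
    (PySem.List.pyRange 1 ((k : Int) + 1) 1).foldl
      (fun gam_vec i =>
        gam_vec ++ [(PySem.List.pyRange 0 i 1).foldl
          (fun g j => g - pyComb (n - 2 * j) (i - j) * PySem.List.pyGetD gam_vec j 0)
          (PySem.List.pyGetD h i 0)])
      [PySem.List.pyGetD h 0 0]
    = (List.range (k + 1)).map (gref h n) := by
  induction k with
  | zero =>
    rw [PySem.List.pyRange_one_eq_nil (by omega)]
    have : (List.range (0 + 1)).map (gref h n) = [gref h n 0] := by simp
    rw [List.foldl_nil, this, gref_eq]
    simp [PySem.List.pyGetD_zero]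
  | succ k ih =>
    have hb : ((k + 1 : Nat) : Int) + 1 = ((k : Int) + 1) + 1 := by push_cast; ring
    rw [hb, PySem.List.pyRange_one_succ_right (by omega), List.foldl_append, ih]
    simp only [List.foldl_cons, List.foldl_nil]
    have hr0 : PySem.List.pyRange 0 ((k : Int) + 1) 1
        = (List.range (k + 1)).map (fun (j : Nat) => (j : Int)) := by
      have := PySem.List.pyRange_zero_nat (k + 1)
      push_cast at this ⊢
      exact this
    rw [hr0, List.foldl_map, foldl_sub]
    have hstart : PySem.List.pyGetD h ((k : Int) + 1) 0 = h.getD (k + 1) 0 := by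
      have : ((k : Int) + 1) = ((k + 1 : Nat) : Int) := by push_cast; ring
      rw [this, PySem.List.pyGetD_natCast]
    have hmap : (List.range (k + 1)).map
        (fun (j : Nat) => pyComb (n - 2 * (j : Int)) (((k : Int) + 1) - (j : Int)) *
          PySem.List.pyGetD ((List.range (k + 1)).map (gref h n)) (j : Int) 0)
      = (List.range (k + 1)).map
        (fun (j : Nat) => cf n (k + 1) j * gref h n j) := by
      apply List.map_congr_left
      intro j hj
      have hjk := List.mem_range.mp hj
      rw [PySem.List.pyGetD_natCast, getD_map_range _ _ _ _ hjk]
      unfold cf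
      push_cast
      ring_nf
    rw [hstart, hmap, ← gref_eq h n (k + 1)]
    conv_rhs => rw [List.range_succ]
    simp

-- B-side mathematics: iterated application of N to the h-vector
def pw (h : List Int) (n : Int) : Nat → Nat → Int
  | 0 => fun i => h.getD i 0
  | t + 1 => fun i => ((List.range i).map (fun j => cf n i j * pw h n t j)).sum

-- partial alternating Neumann sum
def Ssum (h : List Int) (n : Int) (k i : Nat) : Int :=
  ∑ s ∈ Finset.range (k + 1), (-1 : Int) ^ s * pw h n s i

lemma list_sum_range (f : Nat → Int) : ∀ m : Nat,
    ((List.range m).map f).sum = ∑ j ∈ Finset.range m, f j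
  | 0 => by simp
  | m + 1 => by
    rw [List.range_succ, List.map_append, List.sum_append, Finset.sum_range_succ,
      list_sum_range f m]
    simp

-- the key identity: the truncated Neumann sum satisfies A's recurrence
lemma Ssum_eq_gref (h : List Int) (n : Int) : ∀ i k, i ≤ k → Ssum h n k i = gref h n i := by
  intro i
  induction i using Nat.strong_induction_on with
  | _ i IH =>
    intro k hik
    cases k with
    | zero =>
      have hi0 : i = 0 := by omega
      subst hi0
      show ∑ s ∈ Finset.range 1, (-1 : Int) ^ s * pw h n s 0 = gref h n 0
      rw [gref_eq]
      simp [pw]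
    | succ m =>
      unfold Ssum
      rw [Finset.sum_range_succ']
      have hshift : ∑ s ∈ Finset.range (m + 1), (-1 : Int) ^ (s + 1) * pw h n (s + 1) i
          = -∑ s ∈ Finset.range (m + 1), (-1 : Int) ^ s * pw h n (s + 1) i := by
        rw [← Finset.sum_neg_distrib]
        apply Finset.sum_congr rfl
        intro s _
        ring
      have hpw1 : ∀ s, pw h n (s + 1) i
          = ∑ j ∈ Finset.range i, cf n i j * pw h n s j := by
        intro s
        show ((List.range i).map (fun j => cf n i j * pw h n s j)).sum = _
        exact list_sum_range _ i
      have hswap : ∑ s ∈ Finset.range (m + 1), (-1 : Int) ^ s * pw h n (s + 1) i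
          = ∑ j ∈ Finset.range i, cf n i j * Ssum h n m j := by
        calc ∑ s ∈ Finset.range (m + 1), (-1 : Int) ^ s * pw h n (s + 1) i
            = ∑ s ∈ Finset.range (m + 1), ∑ j ∈ Finset.range i,
                cf n i j * ((-1 : Int) ^ s * pw h n s j) := by
              apply Finset.sum_congr rfl
              intro s _
              rw [hpw1 s, Finset.mul_sum]
              apply Finset.sum_congr rfl
              intro j _
              ring
          _ = ∑ j ∈ Finset.range i, ∑ s ∈ Finset.range (m + 1),
                cf n i j * ((-1 : Int) ^ s * pw h n s j) := Finset.sum_comm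
          _ = ∑ j ∈ Finset.range i, cf n i j * Ssum h n m j := by
              apply Finset.sum_congr rfl
              intro j _
              rw [← Finset.mul_sum]
              rfl
      rw [hshift, hswap]
      have hterm : ∀ j ∈ Finset.range i, cf n i j * Ssum h n m j
          = cf n i j * gref h n j := by
        intro j hj
        have hji := List.mem_range.mp (by simpa using hj)
        rw [IH j hji m (by omega)]
      rw [Finset.sum_congr rfl hterm, gref_eq h n i, list_sum_range]
      have hpw0 : pw h n 0 i = h.getD i 0 := rfl
      rw [hpw0]
      ring

-- a fold whose step ignores the list element is an iterate
lemma foldl_const {α β : Type} (St : α → α) : ∀ (l : List β) (a : α),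
    l.foldl (fun s _ => St s) a = St^[l.length] a
  | [], a => by simp
  | _ :: l, a => by
    rw [List.foldl_cons, foldl_const St l (St a), List.length_cons,
      Function.iterate_succ_apply]

-- ===== VERDICT setup: the main equivalence proof =====
theorem gamma_vector_spec : Claim_equal_gamma_vector := by
  intro h hdom hpre
  unfold Spec_gamma_vector
  have hm : 1 ≤ h.length := List.length_pos_iff.mpr hpre
  set m : Nat := h.length with hmdef
  set D : Nat := (m - 1) / 2 with hDdef
  set n : Int := (m : Int) - 1 with hndef
  have hn : n = ((m - 1 : Nat) : Int) := by omega
  have hd : PySem.Int.floordiv n 2 = (D : Int) := by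
    rw [hn]
    exact_mod_cast PySem.Int.floordiv_natCast (m - 1) 2
  have hLm : D + 1 ≤ m := by omega
  -- A side
  have hA : gamma_vector h = (List.range (D + 1)).map (gref h n) := by
    show (PySem.List.pyRange 1 (PySem.Int.floordiv n 2 + 1) 1).foldl _ _ = _
    rw [hd]
    exact A_fold h n D
  -- B side
  have hsize : (D : Int) + 1 = ((D + 1 : Nat) : Int) := by push_cast; ring
  have hr0 : ∀ L : Nat, PySem.List.pyRange 0 ((L : Nat) : Int) 1
      = (List.range L).map (fun (j : Nat) => (j : Int)) := fun L =>
    PySem.List.pyRange_zero_nat L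
  set NlF : Int → List (List Int) := fun sz =>
    (PySem.List.pyRange 0 sz 1).map (fun i =>
      (PySem.List.pyRange 0 i 1).map (fun j => pyComb (n - 2 * j) (i - j))) with hNl
  set StF : Int → (List Int × List Int × Int) → (List Int × List Int × Int) := fun dd st =>
    ((st.1.zip ((PySem.List.pyRange 0 (dd + 1) 1).map (fun i =>
        ((PySem.List.pyRange 0 i 1).map (fun j =>
          PySem.List.pyGetD (PySem.List.pyGetD (NlF (dd + 1)) i []) j 0 *
            PySem.List.pyGetD st.2.1 j 0)).sum))).map (fun p => p.1 + st.2.2 * p.2),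
     (PySem.List.pyRange 0 (dd + 1) 1).map (fun i =>
        ((PySem.List.pyRange 0 i 1).map (fun j =>
          PySem.List.pyGetD (PySem.List.pyGetD (NlF (dd + 1)) i []) j 0 *
            PySem.List.pyGetD st.2.1 j 0)).sum),
     -st.2.2) with hSt
  -- the port, with its let-bindings inlined
  have hB0 : gamma_vector_alt h =
      ((PySem.List.pyRange 0 (PySem.Int.floordiv n 2) 1).foldl
        (fun st _ => StF (PySem.Int.floordiv n 2) st)
        (PySem.List.slice h none (some (PySem.Int.floordiv n 2 + 1)),
         PySem.List.slice h none (some (PySem.Int.floordiv n 2 + 1)), (-1 : Int))).1 := rfl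
  rw [hd] at hB0
  have hrD1 : PySem.List.pyRange 0 ((D : Int) + 1) 1
      = (List.range (D + 1)).map (fun (j : Nat) => (j : Int)) := by
    rw [hsize]; exact hr0 (D + 1)
  -- the matrix rows resolve to cf
  have hNrow : ∀ i : Nat, i < D + 1 →
      (NlF ((D : Int) + 1)).getD i [] = (List.range i).map (fun j => cf n i j) := by
    intro i hi
    simp only [hNl]
    rw [hrD1, List.map_map, getD_map_range _ _ _ _ hi]
    simp only [Function.comp_apply]
    rw [hr0 i, List.map_map]
    apply List.map_congr_left
    intro j _
    simp only [Function.comp_apply]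
    rfl
  -- the initial vector is the pointwise map of pw 0
  have hv0 : PySem.List.slice h none (some ((D : Int) + 1)) = (List.range (D + 1)).map (pw h n 0) := by
    rw [PySem.List.slice_to h (by omega)]
    have ht : ((D : Int) + 1).toNat = D + 1 := by omega
    rw [ht]
    apply List.ext_getElem
    · simp only [List.length_take, List.length_map, List.length_range]
      omega
    · intro i h1 h2
      have hi : i < D + 1 := by simpa using h2
      simp only [List.getElem_take, List.getElem_map, List.getElem_range]
      show h[i] = pw h n 0 i
      simp [pw, List.getD_eq_getElem?_getD, List.getElem?_eq_getElem (by omega : i < h.length)]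
  -- invariant: after k steps the state is (map (Ssum k), map (pw k), -(-1)^k)
  have hinv : ∀ k : Nat,
      (StF ((D : Int)))^[k]
        ((List.range (D + 1)).map (pw h n 0), (List.range (D + 1)).map (pw h n 0), (-1 : Int))
      = ((List.range (D + 1)).map (fun i => Ssum h n k i),
         (List.range (D + 1)).map (pw h n k), -(-1 : Int) ^ k) := by
    intro k
    induction k with
    | zero =>
      have h1 : (List.range (D + 1)).map (fun i => Ssum h n 0 i)
          = (List.range (D + 1)).map (pw h n 0) := by
        apply List.map_congr_left
        intro i _
        show Ssum h n 0 i = pw h n 0 i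
        unfold Ssum
        simp
      rw [Function.iterate_zero, id_eq, h1, pow_zero]
    | succ k ih =>
      rw [Function.iterate_succ_apply', ih]
      simp only [hSt]
      have hv' : (PySem.List.pyRange 0 ((D : Int) + 1) 1).map (fun i =>
          ((PySem.List.pyRange 0 i 1).map (fun j =>
            PySem.List.pyGetD (PySem.List.pyGetD (NlF ((D : Int) + 1)) i []) j 0 *
              PySem.List.pyGetD ((List.range (D + 1)).map (pw h n k)) j 0)).sum)
          = (List.range (D + 1)).map (pw h n (k + 1)) := by
        rw [hrD1, List.map_map]
        apply List.map_congr_left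
        intro i hi
        have hiD := List.mem_range.mp hi
        simp only [Function.comp_apply]
        rw [hr0 i, List.map_map]
        have hpwsucc : pw h n (k + 1) i
            = ((List.range i).map (fun j => cf n i j * pw h n k j)).sum := rfl
        rw [hpwsucc]
        refine congrArg List.sum ?_
        apply List.map_congr_left
        intro j hj
        have hji := List.mem_range.mp hj
        simp only [Function.comp_apply, PySem.List.pyGetD_natCast]
        rw [hNrow i hiD, getD_map_range _ _ _ _ hji,
          getD_map_range _ _ _ _ (by omega : j < D + 1)]
      rw [hv']
      have h1 : (((List.range (D + 1)).map (fun i => Ssum h n k i)).zip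
            ((List.range (D + 1)).map (pw h n (k + 1)))).map
            (fun p => p.1 + -(-1 : Int) ^ k * p.2)
          = (List.range (D + 1)).map (fun i => Ssum h n (k + 1) i) := by
        rw [List.zip_map', List.map_map]
        apply List.map_congr_left
        intro i _
        simp only [Function.comp_apply]
        show Ssum h n k i + -(-1 : Int) ^ k * pw h n (k + 1) i = Ssum h n (k + 1) i
        unfold Ssum
        rw [Finset.sum_range_succ (fun s => (-1 : Int) ^ s * pw h n s i) (k + 1)]
        ring
      rw [h1, show -(-(-1 : Int) ^ k) = -(-1 : Int) ^ (k + 1) from by ring]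
  -- assemble B
  rw [hv0] at hB0
  rw [foldl_const ((StF ((D : Int)))) (PySem.List.pyRange 0 ((D : Nat) : Int) 1)] at hB0
  have hlen : (PySem.List.pyRange 0 ((D : Nat) : Int) 1).length = D := by
    rw [hr0 D]; simp
  rw [hlen, hinv D] at hB0
  rw [hA, hB0]
  show (List.range (D + 1)).map (gref h n) = (List.range (D + 1)).map (fun i => Ssum h n D i)
  apply List.map_congr_left
  intro i hi
  have hiD := List.mem_range.mp hi
  exact (Ssum_eq_gref h n i D (by omega)).symm
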